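-- pv_equiv track=rewrite | github.com/alvarolss/Mason | dfs.py | touching_loops
-- ===== SOURCE A (Python) =====
-- def touching_loops(vet_loops):
--     # Returns True if any of the meshes passed by the argument touch each other. Returns False for other cases
--     # Paths can also be passed in arguments
--     if len(vet_loops) < 2:
--         # Returns False if there are less than two loops
--         return False
--     for i in range(0, len(vet_loops)):
--         for j in range(i+1, len(vet_loops)):
--             for l in vet_loops[i]:
--                 if vet_loops[j].count(l):
--                     return True
--     return False
-- ===== SOURCE B (Python) =====
-- def touching_loops(vet_loops):
--     # One pass: keep a set of elements seen in earlier loops; a hit means two loops touch.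
--     seen = set()
--     for loop in vet_loops:
--         if any(x in seen for x in loop):
--             return True
--         seen.update(loop)
--     return False
-- ===== Notes on version B (the rewrite author's own statement) =====
-- stated objective: alternative
-- what changed: Replaced the quadruple nested scan over all loop pairs (with list.count as inner membership test) by a single pass that accumulates a set of elements of earlier loops and checks each new loop against it; worst-case cost drops from quadratic in the loops to linear in the total number of elements, though a timing run's inputs let A exit early so no speedup was measured.
import Mathlib
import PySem

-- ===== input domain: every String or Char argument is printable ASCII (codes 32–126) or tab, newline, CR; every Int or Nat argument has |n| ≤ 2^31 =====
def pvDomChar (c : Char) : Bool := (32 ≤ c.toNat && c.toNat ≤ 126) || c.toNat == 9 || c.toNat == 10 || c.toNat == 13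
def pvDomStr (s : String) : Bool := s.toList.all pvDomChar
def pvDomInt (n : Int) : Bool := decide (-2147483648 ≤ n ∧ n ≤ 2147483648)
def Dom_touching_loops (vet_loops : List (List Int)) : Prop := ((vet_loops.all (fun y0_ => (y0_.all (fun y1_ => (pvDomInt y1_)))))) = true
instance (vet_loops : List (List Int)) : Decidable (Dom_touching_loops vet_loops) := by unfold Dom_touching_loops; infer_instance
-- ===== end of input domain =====

-- B replaces A's scan over all loop pairs by one pass with a growing set of already-seen elements (alternative algorithm).

-- ===== PORT A =====
def touching_loops (vet_loops : List (List Int)) : Bool :=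
  if vet_loops.length < 2 then false
  else
    (PySem.List.pyRange 0 (vet_loops.length : Int) 1).any (fun i =>
      (PySem.List.pyRange (i + 1) (vet_loops.length : Int) 1).any (fun j =>
        (PySem.List.pyGetD vet_loops i []).any (fun l =>
          PySem.List.count (PySem.List.pyGetD vet_loops j []) l != 0)))

-- ===== PORT B =====
def tlGo : List (List Int) → PySem.Set Int → Bool
  | [], _ => false
  | loop :: rest, seen =>
    if loop.any (fun x => PySem.Set.contains seen x) then true
    else tlGo rest (PySem.Set.update seen loop)

def touching_loops_alt (vet_loops : List (List Int)) : Bool :=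
  tlGo vet_loops PySem.Set.empty

-- ===== PRECONDITION & SPEC =====
def Spec_touching_loops (vet_loops : List (List Int)) (out : Bool) : Prop := out = touching_loops_alt vet_loops
instance (vet_loops : List (List Int)) (out : Bool) : Decidable (Spec_touching_loops vet_loops out) := by unfold Spec_touching_loops; infer_instance

-- ===== CLAIM (what is proved, stated in full; the proofs are below) =====
def Claim_equal_touching_loops : Prop := ∀ (vet_loops : List (List Int)), Dom_touching_loops vet_loops → Spec_touching_loops vet_loops (touching_loops vet_loops)

-- ===== LEMMAS AND PROOFS =====

-- characterization of B's single pass, generalized over the accumulated set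
lemma tlGo_iff (rest : List (List Int)) : ∀ (seen : PySem.Set Int),
    tlGo rest seen = true ↔
      ∃ j, j < rest.length ∧ ∃ x, x ∈ rest.getD j [] ∧
        (x ∈ seen ∨ ∃ i, i < j ∧ x ∈ rest.getD i []) := by
  induction rest with
  | nil => intro seen; simp [tlGo]
  | cons a t ih =>
    intro seen
    by_cases h : a.any (fun x => PySem.Set.contains seen x) = true
    · have hstep : tlGo (a :: t) seen = true := by
        rw [show tlGo (a :: t) seen = if a.any (fun x => PySem.Set.contains seen x) then true
              else tlGo t (PySem.Set.update seen a) from rfl, if_pos h]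
      rw [hstep]
      rcases List.any_eq_true.mp h with ⟨x, hxa, hxs⟩
      rw [PySem.Set.contains_iff] at hxs
      exact iff_of_true rfl ⟨0, by simp, x, by simpa using hxa, Or.inl hxs⟩
    · have hno : ∀ x ∈ a, x ∉ seen := by
        intro x hx hxs
        exact h (List.any_eq_true.mpr ⟨x, hx, (PySem.Set.contains_iff seen x).mpr hxs⟩)
      have hstep : tlGo (a :: t) seen = tlGo t (PySem.Set.update seen a) := by
        rw [show tlGo (a :: t) seen = if a.any (fun x => PySem.Set.contains seen x) then true
              else tlGo t (PySem.Set.update seen a) from rfl, if_neg h]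
      rw [hstep, ih]
      constructor
      · rintro ⟨j, hj, x, hx, hcase⟩
        refine ⟨j + 1, by simpa using Nat.succ_lt_succ hj, x, by simpa using hx, ?_⟩
        rcases hcase with hs | ⟨i, hij, hi⟩
        · rcases (PySem.Set.mem_update _ _ _).mp hs with hs | ha
          · exact Or.inl hs
          · exact Or.inr ⟨0, Nat.succ_pos _, by simpa using ha⟩
        · exact Or.inr ⟨i + 1, Nat.succ_lt_succ hij, by simpa using hi⟩
      · rintro ⟨j, hj, x, hx, hcase⟩
        cases j with
        | zero =>
          simp only [List.getD_cons_zero] at hx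
          rcases hcase with hs | ⟨i, hi0, _⟩
          · exact absurd hs (hno x hx)
          · omega
        | succ j' =>
          simp only [List.length_cons] at hj
          refine ⟨j', by omega, x, by simpa using hx, ?_⟩
          rcases hcase with hs | ⟨i, hij, hi⟩
          · exact Or.inl ((PySem.Set.mem_update _ _ _).mpr (Or.inl hs))
          cases i with
          | zero =>
            exact Or.inl ((PySem.Set.mem_update _ _ _).mpr (Or.inr (by simpa using hi)))
          | succ i' =>
            exact Or.inr ⟨i', by omega, by simpa using hi⟩

-- characterization of A's pairwise scan
lemma touching_loops_iff (v : List (List Int)) :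
    touching_loops v = true ↔
      ∃ j, j < v.length ∧ ∃ x, x ∈ v.getD j [] ∧
        ∃ i, i < j ∧ x ∈ v.getD i [] := by
  unfold touching_loops
  by_cases hlen : v.length < 2
  · simp only [hlen, if_true]
    constructor
    · intro h; cases h
    · rintro ⟨j, hj, _, _, i, hij, _⟩; omega
  · simp only [hlen, if_false, List.any_eq_true, PySem.List.mem_pyRange_one]
    constructor
    · rintro ⟨i, ⟨hi0, hin⟩, j, ⟨hij, hjn⟩, x, hx, hcnt⟩
      have hxj : x ∈ PySem.List.pyGetD v j [] := by
        have : 0 < (PySem.List.pyGetD v j []).count x := by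
          rcases Nat.eq_zero_or_pos ((PySem.List.pyGetD v j []).count x) with h0 | h0
          · rw [PySem.List.count_eq] at hcnt; simp [h0] at hcnt
          · exact h0
        exact List.count_pos_iff.mp this
      have hgi : PySem.List.pyGetD v i [] = v.getD i.toNat [] :=
        PySem.List.pyGetD_of_nonneg v [] hi0
      have hgj : PySem.List.pyGetD v j [] = v.getD j.toNat [] :=
        PySem.List.pyGetD_of_nonneg v [] (by omega)
      exact ⟨j.toNat, by omega, x, hgj ▸ hxj, i.toNat, by omega, hgi ▸ hx⟩
    · rintro ⟨j, hj, x, hxj, i, hij, hxi⟩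
      refine ⟨(i : Int), ⟨by omega, by omega⟩, (j : Int), ⟨by omega, by omega⟩, x, ?_, ?_⟩
      · rw [PySem.List.pyGetD_of_nonneg v [] (by omega)]
        simpa using hxi
      · rw [PySem.List.count_eq, PySem.List.pyGetD_of_nonneg v [] (by omega)]
        have : x ∈ v.getD (((j : Int)).toNat) [] := by simpa using hxj
        have := List.count_pos_iff.mpr this
        simp only [bne_iff_ne]; omega

-- ===== VERDICT (by name: the statement is the Claim_ definition above) =====
theorem touching_loops_spec : Claim_equal_touching_loops := by
  intro v _
  unfold Spec_touching_loops touching_loops_alt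
  rw [Bool.eq_iff_iff, touching_loops_iff, tlGo_iff]
  constructor
  · rintro ⟨j, hj, x, hxj, i, hij, hxi⟩
    exact ⟨j, hj, x, hxj, Or.inr ⟨i, hij, hxi⟩⟩
  · rintro ⟨j, hj, x, hxj, hs | hrest⟩
    · exact absurd hs (by simp [PySem.Set.empty])
    · exact ⟨j, hj, x, hxj, hrest⟩
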